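-- pv_equiv track=rewrite | github.com/Ethara-Ai/pzprjs | games/shabid/verify_uniqueness.py | decode_border_string
-- ===== SOURCE A (Python) =====
-- def decode_border_string(border_str, rows, cols):
--     """
--     Decode pzpr border string into wall sets.
--
--     Border encoding order (matches pzpr.js):
--     - First (cols-1)*rows bits: horizontal borders (between columns, row by row)
--       These are VERTICAL walls between cell (r,c) and (r,c+1)
--     - Then cols*(rows-1) bits: vertical borders (between rows, col by col)
--       These are HORIZONTAL walls between cell (r,c) and (r+1,c)
--
--     Each base-32 digit encodes 5 borders via bitmask [16, 8, 4, 2, 1]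
--     """
--     # Decode all bits from the base-32 string
--     bits = []
--     for ch in border_str:
--         val = int(ch, 32)
--         bits.extend([(val >> (4-i)) & 1 for i in range(5)])
--
--     h_walls = set()  # Walls between (r,c) and (r,c+1) — vertical line between cols
--     v_walls = set()  # Walls between (r,c) and (r+1,c) — horizontal line between rows
--
--     # First (cols-1)*rows bits: borders between adjacent columns
--     idx = 0
--     for r in range(rows):
--         for c in range(cols - 1):
--             if idx < len(bits) and bits[idx]:
--                 h_walls.add((r, c))  # wall between (r,c) and (r,c+1)
--             idx += 1
--
--     # Next cols*(rows-1) bits: borders between adjacent rows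
--     for r in range(rows - 1):
--         for c in range(cols):
--             if idx < len(bits) and bits[idx]:
--                 v_walls.add((r, c))  # wall between (r,c) and (r+1,c)
--             idx += 1
--
--     return h_walls, v_walls
-- ===== SOURCE B (Python) =====
-- def decode_border_string(border_str, rows, cols):
--     """Decode pzpr border string into wall sets (direct bit-to-coordinate mapping)."""
--     hn = (cols - 1) * rows if rows > 0 and cols > 1 else 0
--     vn = cols * (rows - 1) if rows > 1 and cols > 0 else 0
--     h_walls = set()
--     v_walls = set()
--     for p, ch in enumerate(border_str):
--         val = int(ch, 32)
--         for i in range(5):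
--             if (val >> (4 - i)) & 1:
--                 g = p * 5 + i
--                 if g < hn:
--                     h_walls.add((g // (cols - 1), g % (cols - 1)))
--                 elif g < hn + vn:
--                     j = g - hn
--                     v_walls.add((j // cols, j % cols))
--     return h_walls, v_walls
-- ===== Notes on version B (the rewrite author's own statement) =====
-- stated objective: alternative
-- what changed: Instead of expanding the whole string into a bit list and sweeping every grid border slot with a running index, B iterates only over the set bits of each base-32 digit and maps each global bit index directly to its wall coordinate with div/mod; Pre_ excludes strings containing a character that is not a base-32 digit, on which A raises ValueError.
import Mathlib
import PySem

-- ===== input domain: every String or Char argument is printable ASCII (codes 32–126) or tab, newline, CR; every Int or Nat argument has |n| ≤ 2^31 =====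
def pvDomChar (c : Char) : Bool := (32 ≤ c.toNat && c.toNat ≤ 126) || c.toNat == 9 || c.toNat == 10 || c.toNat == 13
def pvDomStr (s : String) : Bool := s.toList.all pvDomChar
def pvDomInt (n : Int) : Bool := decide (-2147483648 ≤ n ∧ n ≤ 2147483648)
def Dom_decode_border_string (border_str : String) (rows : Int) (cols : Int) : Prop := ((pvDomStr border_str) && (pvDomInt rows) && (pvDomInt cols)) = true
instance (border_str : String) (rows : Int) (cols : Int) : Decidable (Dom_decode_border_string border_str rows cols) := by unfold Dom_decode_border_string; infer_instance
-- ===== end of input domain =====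

-- B decodes each set bit of the base-32 string directly to its wall coordinate by div/mod,
-- instead of materialising a bit list and sweeping every border slot of the grid (objective: alternative).


-- int(ch, 32) for a single character (Pre_ guarantees it succeeds; default is never used there)
def pvVal32 (ch : Char) : Int := (PySem.Int.ofCharsBase? [ch] 32).getD 0

-- ===== PORT A =====
def decode_border_string (border_str : String) (rows : Int) (cols : Int) :
    (List (Int × Int)) × (List (Int × Int)) :=
  -- bits = []; for ch in border_str: bits.extend([(int(ch,32) >> (4-i)) & 1 for i in range(5)])
  let bits : List Int := border_str.toList.foldl
    (fun bits ch =>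
      let val := pvVal32 ch
      bits ++ (PySem.List.pyRange 0 5 1).map (fun i => Int.land (val >>> (4 - i)) 1)) []
  -- first nested loop: h_walls, threading idx
  let s1 : PySem.Set (Int × Int) × Int :=
    (PySem.List.pyRange 0 rows 1).foldl (fun st r =>
      (PySem.List.pyRange 0 (cols - 1) 1).foldl (fun st c =>
        let st' := if st.2 < (PySem.List.len bits) ∧ PySem.List.pyGetD bits st.2 0 ≠ 0
          then (PySem.Set.add st.1 (r, c), st.2) else st
        (st'.1, st'.2 + 1)) st)
      ((PySem.Set.empty : PySem.Set (Int × Int)), 0)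
  -- second nested loop: v_walls, idx carried over
  let s2 : PySem.Set (Int × Int) × Int :=
    (PySem.List.pyRange 0 (rows - 1) 1).foldl (fun st r =>
      (PySem.List.pyRange 0 cols 1).foldl (fun st c =>
        let st' := if st.2 < (PySem.List.len bits) ∧ PySem.List.pyGetD bits st.2 0 ≠ 0
          then (PySem.Set.add st.1 (r, c), st.2) else st
        (st'.1, st'.2 + 1)) st)
      ((PySem.Set.empty : PySem.Set (Int × Int)), s1.2)
  (s1.1, s2.1)

-- ===== PORT B =====
def decode_border_string_alt (border_str : String) (rows : Int) (cols : Int) :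
    (List (Int × Int)) × (List (Int × Int)) :=
  let hn : Int := if rows > 0 ∧ cols > 1 then (cols - 1) * rows else 0
  let vn : Int := if rows > 1 ∧ cols > 0 then cols * (rows - 1) else 0
  (PySem.List.enumerate border_str.toList 0).foldl
    (fun (st : PySem.Set (Int × Int) × PySem.Set (Int × Int)) pch =>
      let val := pvVal32 pch.2
      (PySem.List.pyRange 0 5 1).foldl (fun st i =>
        if Int.land (val >>> (4 - i)) 1 ≠ 0 then
          let g := pch.1 * 5 + i
          if g < hn then
            (PySem.Set.add st.1 (PySem.Int.floordiv g (cols - 1), PySem.Int.mod g (cols - 1)), st.2)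
          else if g < hn + vn then
            let j := g - hn
            (st.1, PySem.Set.add st.2 (PySem.Int.floordiv j cols, PySem.Int.mod j cols))
          else st
        else st) st)
    ((PySem.Set.empty : PySem.Set (Int × Int)), (PySem.Set.empty : PySem.Set (Int × Int)))

-- ===== PRECONDITION & SPEC =====
def pvIsB32 (c : Char) : Bool :=
  ('0' ≤ c && c ≤ '9') || ('a' ≤ c && c ≤ 'v') || ('A' ≤ c && c ≤ 'V')

-- Pre_ excludes exactly the strings containing a non-base-32 character, on which int(ch, 32) raises ValueError
def Pre_decode_border_string (border_str : String) (rows : Int) (cols : Int) : Prop :=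
  border_str.toList.all pvIsB32 = true
instance (border_str : String) (rows : Int) (cols : Int) : Decidable (Pre_decode_border_string border_str rows cols) := by unfold Pre_decode_border_string; infer_instance

def pvWitness_decode_border_string : String × Int × Int := ("g42", 2, 3)

def Spec_decode_border_string (border_str : String) (rows : Int) (cols : Int) (out : (List (Int × Int)) × (List (Int × Int))) : Prop := out = decode_border_string_alt border_str rows cols
instance (border_str : String) (rows : Int) (cols : Int) (out : (List (Int × Int)) × (List (Int × Int))) : Decidable (Spec_decode_border_string border_str rows cols out) := by unfold Spec_decode_border_string; infer_instance

-- ===== CLAIM (what is proved, stated in full; the proofs are below) =====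
def Claim_equal_decode_border_string : Prop := ∀ (border_str : String) (rows : Int) (cols : Int), Dom_decode_border_string border_str rows cols → Pre_decode_border_string border_str rows cols → Spec_decode_border_string border_str rows cols (decode_border_string border_str rows cols)

-- ===== LEMMAS AND PROOFS =====

-- bit list helpers
def pvBitsOfVal (v : Int) : List Int :=
  [Int.land (v >>> 4) 1, Int.land (v >>> 3) 1, Int.land (v >>> 2) 1,
   Int.land (v >>> 1) 1, Int.land (v >>> 0) 1]

def pvBits (cs : List Char) : List Int := cs.flatMap (fun ch => pvBitsOfVal (pvVal32 ch))

lemma pvBitsOfVal_map (v : Int) :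
    (PySem.List.pyRange 0 5 1).map (fun i => Int.land (v >>> (4 - i)) 1) = pvBitsOfVal v := by
  have h : PySem.List.pyRange 0 5 1 = [0, 1, 2, 3, 4] := by decide
  norm_num [h, pvBitsOfVal]

lemma pvBitsOfVal_length (v : Int) : (pvBitsOfVal v).length = 5 := rfl

lemma pvBits_eq (cs : List Char) (acc : List Int) :
    cs.foldl (fun bits ch =>
      bits ++ (PySem.List.pyRange 0 5 1).map (fun i => Int.land ((pvVal32 ch) >>> (4 - i)) 1)) acc
    = acc ++ pvBits cs := by
  induction cs generalizing acc with
  | nil => simp [pvBits]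
  | cons c cs ih =>
    rw [List.foldl_cons, ih, pvBitsOfVal_map]
    simp [pvBits, List.append_assoc]

lemma pvBits_length (cs : List Char) : (pvBits cs).length = 5 * cs.length := by
  induction cs with
  | nil => simp [pvBits]
  | cons c cs ih =>
    simp only [pvBits, List.flatMap_cons, List.length_append, pvBitsOfVal_length, List.length_cons]
    simp only [pvBits] at ih
    omega

lemma pvBitsOfVal_getD (v : Int) (i : ℕ) (h : i < 5) :
    (pvBitsOfVal v).getD i 0 = Int.land (v >>> (4 - (i : Int))) 1 := by
  interval_cases i <;> norm_num [pvBitsOfVal]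

lemma pvBits_getD (cs : List Char) (p i : ℕ) (hp : p < cs.length) (hi : i < 5) :
    (pvBits cs).getD (5 * p + i) 0 = (pvBitsOfVal (pvVal32 (cs.getD p 'a'))).getD i 0 := by
  induction cs generalizing p with
  | nil => simp at hp
  | cons c cs ih =>
    cases p with
    | zero =>
      simp only [pvBits, List.flatMap_cons]
      rw [show 5 * 0 + i = i by omega, List.getD_append _ _ _ i (by rw [pvBitsOfVal_length]; omega)]
      simp
    | succ p =>
      simp only [pvBits, List.flatMap_cons]
      rw [List.getD_append_right _ _ _ _ (by rw [pvBitsOfVal_length]; omega)]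
      rw [pvBitsOfVal_length, show 5 * (p + 1) + i - 5 = 5 * p + i by omega]
      simpa using ih p (by simpa using hp)

-- generic fold lemmas
lemma pv_foldl_prod {α σ τ : Type} (l : List α) (f : σ → α → σ) (g : τ → α → τ) (s0 : σ) (t0 : τ) :
    l.foldl (fun st k => (f st.1 k, g st.2 k)) (s0, t0) = (l.foldl f s0, l.foldl g t0) := by
  induction l generalizing s0 t0 with
  | nil => rfl
  | cons a l ih => simp [List.foldl_cons, ih]

lemma pv_foldl_range_mul {σ : Type} (R C : ℕ) (f : σ → ℕ → ℕ → σ) (init : σ) :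
    (List.range R).foldl (fun s r => (List.range C).foldl (fun s c => f s r c) s) init
    = (List.range (R * C)).foldl (fun s k => f s (k / C) (k % C)) init := by
  induction R generalizing init with
  | zero => simp
  | succ R ih =>
    rw [List.range_succ, List.foldl_append, ih]
    rcases Nat.eq_zero_or_pos C with hC | hC
    · subst hC; simp
    · rw [show (R + 1) * C = R * C + C by ring, List.range_add, List.foldl_append, List.foldl_map]
      simp only [List.foldl_cons, List.foldl_nil]
      apply PySem.List.foldl_congr_mem
      intro acc x hx
      have hxC : x < C := List.mem_range.mp hx
      rw [show R * C + x = C * R + x by ring, Nat.mul_add_div hC, Nat.mul_add_mod,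
        Nat.div_eq_of_lt hxC, Nat.mod_eq_of_lt hxC, Nat.add_zero]

lemma pv_foldl_add_filterMap {α β : Type} [BEq β] [LawfulBEq β] (l : List α) (f : α → Option β)
    (acc : List β) (hnd : (l.filterMap f).Nodup) (hdisj : ∀ k ∈ l, ∀ x, f k = some x → x ∉ acc) :
    l.foldl (fun s k => match f k with | some x => PySem.Set.add s x | none => s) acc
    = acc ++ l.filterMap f := by
  induction l generalizing acc with
  | nil => simp
  | cons a l ih =>
    simp only [List.foldl_cons]
    cases hfa : f a with
    | none =>
      rw [ih acc (by simpa [List.filterMap_cons, hfa] using hnd)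
        (fun k hk x hx => hdisj k (List.mem_cons_of_mem a hk) x hx)]
      simp [hfa]
    | some x =>
      have hx : x ∉ acc := hdisj a List.mem_cons_self x hfa
      have hxl : x ∉ l.filterMap f := by
        have := hnd
        rw [List.filterMap_cons, hfa] at this
        exact (List.nodup_cons.mp this).1
      have hadd : PySem.Set.add acc x = acc ++ [x] := by
        simp [PySem.Set.add, PySem.Set.contains, hx]
      show List.foldl (fun s k => match f k with | some y => PySem.Set.add s y | none => s)
        (PySem.Set.add acc x) l = acc ++ List.filterMap f (a :: l)
      rw [hadd, ih (acc ++ [x])]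
      · rw [List.filterMap_cons, hfa]; simp
      · have := hnd
        rw [List.filterMap_cons, hfa] at this
        exact (List.nodup_cons.mp this).2
      · intro k hk y hy
        simp only [List.mem_append, List.mem_singleton]
        rintro (h | rfl)
        · exact hdisj k (List.mem_cons_of_mem a hk) y hy h
        · exact hxl (List.mem_filterMap.mpr ⟨k, hk, hy⟩)

lemma pv_filterMap_range_ext {β : Type} (f : ℕ → Option β) (m M : ℕ) (hm : m ≤ M)
    (h : ∀ j, m ≤ j → f j = none) :
    (List.range M).filterMap f = (List.range m).filterMap f := by
  rw [show M = m + (M - m) by omega, List.range_add, List.filterMap_append]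
  have : List.filterMap f (List.map (fun x => m + x) (List.range (M - m))) = [] := by
    rw [List.filterMap_map, List.filterMap_eq_nil_iff]
    intro j _
    exact h (m + j) (by omega)
  simp [this]

lemma pv_filterMap_range_ext_both {β : Type} (f : ℕ → Option β) (m M : ℕ)
    (hm : ∀ j, m ≤ j → f j = none) (hM : ∀ j, M ≤ j → f j = none) :
    (List.range M).filterMap f = (List.range m).filterMap f := by
  rcases le_total m M with h | h
  · exact pv_filterMap_range_ext f m M h hm
  · exact (pv_filterMap_range_ext f M m h hM).symm

lemma pv_filterMap_range_shift {β : Type} (f : ℕ → Option β) (a b M : ℕ)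
    (h0 : ∀ j, j < a → f j = none) (h1 : ∀ j, a + b ≤ j → f j = none)
    (h2 : ∀ j, M ≤ j → f j = none) :
    (List.range M).filterMap f = (List.range b).filterMap (fun k => f (a + k)) := by
  have hab : (List.range M).filterMap f = (List.range (a + b)).filterMap f :=
    pv_filterMap_range_ext_both f (a + b) M h1 h2
  rw [hab, List.range_add, List.filterMap_append]
  have hpre : (List.range a).filterMap f = [] := by
    rw [List.filterMap_eq_nil_iff]
    intro j hj
    exact h0 j (List.mem_range.mp hj)
  rw [hpre, List.filterMap_map]
  rfl

-- the canonical per-bit decoding functions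
def pvFH (cs : List Char) (R C : ℕ) : ℕ → Option (Int × Int) := fun k =>
  if (pvBits cs).getD k 0 ≠ 0 ∧ k < R * C then
    some (((k / C : ℕ) : Int), ((k % C : ℕ) : Int)) else none

def pvFV (cs : List Char) (R C R' C' : ℕ) : ℕ → Option (Int × Int) := fun k =>
  if (pvBits cs).getD k 0 ≠ 0 ∧ R * C ≤ k ∧ k < R * C + R' * C' then
    some ((((k - R * C) / C' : ℕ) : Int), (((k - R * C) % C' : ℕ) : Int)) else none

lemma pvFH_nodup (cs : List Char) (R C M : ℕ) :
    ((List.range M).filterMap (pvFH cs R C)).Nodup := by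
  apply List.Nodup.filterMap _ List.nodup_range
  intro a a' b hb hb'
  simp only [pvFH, Option.mem_def] at hb hb'
  split_ifs at hb hb' with h1 h2 <;> try simp_all
  rw [← hb'] at hb
  obtain ⟨e1, e2⟩ := Prod.mk.injEq _ _ _ _ ▸ hb
  have key : (a : ℤ) = (a' : ℤ) := by
    rw [← Int.ediv_add_emod (a : ℤ) (C : ℤ), ← Int.ediv_add_emod (a' : ℤ) (C : ℤ), e1, e2]
  exact_mod_cast key

lemma pvFV_nodup (cs : List Char) (R C R' C' M : ℕ) :
    ((List.range M).filterMap (pvFV cs R C R' C')).Nodup := by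
  apply List.Nodup.filterMap _ List.nodup_range
  intro a a' b hb hb'
  simp only [pvFV, Option.mem_def] at hb hb'
  split_ifs at hb hb' with h1 h2 <;> try simp_all
  rw [← hb'] at hb
  obtain ⟨e1, e2⟩ := Prod.mk.injEq _ _ _ _ ▸ hb
  have key : (a : ℤ) - (R : ℤ) * (C : ℤ) = (a' : ℤ) - (R : ℤ) * (C : ℤ) := by
    rw [← Int.ediv_add_emod ((a : ℤ) - (R : ℤ) * (C : ℤ)) (C' : ℤ),
      ← Int.ediv_add_emod ((a' : ℤ) - (R : ℤ) * (C : ℤ)) (C' : ℤ), e1, e2]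
  have key2 : (a : ℤ) = (a' : ℤ) := by omega
  exact_mod_cast key2

-- A's nested loop, flattened: set-accumulation with a threaded index counter
lemma pv_A_flat (bits : List Int) (e : ℕ → Int × Int) (M i0 : ℕ) (i0I : Int)
    (hi : i0I = (i0 : Int)) (acc : List (Int × Int))
    (hnd : ((List.range M).filterMap
      (fun k => if bits.getD (i0 + k) 0 ≠ 0 then some (e k) else none)).Nodup)
    (hdisj : ∀ x ∈ (List.range M).filterMap
      (fun k => if bits.getD (i0 + k) 0 ≠ 0 then some (e k) else none), x ∉ acc) :
    (List.range M).foldl (fun st k =>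
      let st' := if st.2 < PySem.List.len bits ∧ PySem.List.pyGetD bits st.2 0 ≠ 0
        then (PySem.Set.add st.1 (e k), st.2) else st
      (st'.1, st'.2 + 1)) (acc, i0I)
    = (acc ++ (List.range M).filterMap
        (fun k => if bits.getD (i0 + k) 0 ≠ 0 then some (e k) else none),
       ((i0 + M : ℕ) : Int)) := by
  subst hi
  induction M with
  | zero => simp
  | succ M ih =>
    rw [List.range_succ, List.foldl_append] at *
    rw [List.filterMap_append] at hnd hdisj ⊢
    have hsub : ((List.range M).filterMap
        (fun k => if bits.getD (i0 + k) 0 ≠ 0 then some (e k) else none)).Nodup :=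
      (List.Nodup.of_append_left hnd)
    have hdsub : ∀ x ∈ (List.range M).filterMap
        (fun k => if bits.getD (i0 + k) 0 ≠ 0 then some (e k) else none), x ∉ acc :=
      fun x hx => hdisj x (List.mem_append.mpr (Or.inl hx))
    rw [ih hsub hdsub]
    simp only [List.foldl_cons, List.foldl_nil, List.filterMap_cons, List.filterMap_nil]
    have hcond : ((((i0 + M : ℕ) : Int) < PySem.List.len bits ∧
        PySem.List.pyGetD bits ((i0 + M : ℕ) : Int) 0 ≠ 0) ↔ bits.getD (i0 + M) 0 ≠ 0) := by
      rw [PySem.List.pyGetD_natCast, PySem.List.len_eq]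
      constructor
      · exact fun h => h.2
      · intro h
        refine ⟨?_, h⟩
        by_contra hlen
        exact h (List.getD_eq_default _ _ (by exact_mod_cast not_lt.mp hlen))
    by_cases hb : bits.getD (i0 + M) 0 ≠ 0
    · have hcondT : (((i0 + M : ℕ) : Int) < PySem.List.len bits ∧
        PySem.List.pyGetD bits ((i0 + M : ℕ) : Int) 0 ≠ 0) := hcond.mpr hb
      simp only [if_pos hcondT, if_pos hb]
      have hmem : e M ∉ acc ++ (List.range M).filterMap
          (fun k => if bits.getD (i0 + k) 0 ≠ 0 then some (e k) else none) := by
        have hone : List.filterMap (fun k => if bits.getD (i0 + k) 0 ≠ 0 then some (e k) else none) [M]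
            = [e M] := by simp only [List.filterMap_cons, List.filterMap_nil, if_pos hb]
        intro hmem
        rcases List.mem_append.mp hmem with h | h
        · exact hdisj (e M) (List.mem_append.mpr (Or.inr (by rw [hone]; simp))) h
        · rw [hone] at hnd
          exact ((List.nodup_append.mp hnd).2.2 (e M) h (e M) (by simp)) rfl
      have hadd : PySem.Set.add (acc ++ (List.range M).filterMap
          (fun k => if bits.getD (i0 + k) 0 ≠ 0 then some (e k) else none)) (e M)
          = (acc ++ (List.range M).filterMap
          (fun k => if bits.getD (i0 + k) 0 ≠ 0 then some (e k) else none)) ++ [e M] := by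
        simp only [PySem.Set.add, PySem.Set.contains]
        rw [if_neg (by simpa using hmem)]
      rw [hadd]
      refine Prod.ext (by simp [List.append_assoc]) (by push_cast; ring)
    · have hcondF : ¬(((i0 + M : ℕ) : Int) < PySem.List.len bits ∧
        PySem.List.pyGetD bits ((i0 + M : ℕ) : Int) 0 ≠ 0) := fun h => hb (hcond.mp h)
      simp only [if_neg hcondF, if_neg hb]
      refine Prod.ext (by simp) (by push_cast; ring)

-- B's flattened loop: pair of sets, each fed by an option-valued per-index function
lemma pv_foldl_pair_match {β : Type} [BEq β] [LawfulBEq β] (M : ℕ)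
    (F : (PySem.Set β × PySem.Set β) → ℕ → (PySem.Set β × PySem.Set β))
    (fH fV : ℕ → Option β) (accH accV : List β)
    (hF : ∀ st : PySem.Set β × PySem.Set β, ∀ k ∈ List.range M, F st k =
      ((match fH k with | some x => PySem.Set.add st.1 x | none => st.1),
       (match fV k with | some x => PySem.Set.add st.2 x | none => st.2)))
    (hndH : ((List.range M).filterMap fH).Nodup) (hndV : ((List.range M).filterMap fV).Nodup)
    (hdH : ∀ k ∈ List.range M, ∀ x, fH k = some x → x ∉ accH)
    (hdV : ∀ k ∈ List.range M, ∀ x, fV k = some x → x ∉ accV) :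
    (List.range M).foldl F (accH, accV)
    = (accH ++ (List.range M).filterMap fH, accV ++ (List.range M).filterMap fV) := by
  rw [PySem.List.foldl_congr_mem _ _ (fun st k =>
      ((fun s k => match fH k with | some x => PySem.Set.add s x | none => s) st.1 k,
       (fun s k => match fV k with | some x => PySem.Set.add s x | none => s) st.2 k)) _
      (fun acc x hx => hF acc x hx)]
  rw [pv_foldl_prod _ (fun s k => match fH k with | some x => PySem.Set.add s x | none => s)
      (fun s k => match fV k with | some x => PySem.Set.add s x | none => s) accH accV,
    pv_foldl_add_filterMap _ _ _ hndH hdH, pv_foldl_add_filterMap _ _ _ hndV hdV]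

lemma pv_hn_eq (rows cols : Int) :
    (if rows > 0 ∧ cols > 1 then (cols - 1) * rows else 0)
    = ((rows.toNat * (cols - 1).toNat : ℕ) : Int) := by
  split_ifs with h
  · push_cast
    rw [Int.toNat_of_nonneg (by omega : (0:Int) ≤ rows),
      Int.toNat_of_nonneg (by omega : (0:Int) ≤ cols - 1)]
    ring
  · have : rows.toNat = 0 ∨ (cols - 1).toNat = 0 := by omega
    rcases this with h' | h' <;> simp [h']

lemma pv_vn_eq (rows cols : Int) :
    (if rows > 1 ∧ cols > 0 then cols * (rows - 1) else 0)
    = (((rows - 1).toNat * cols.toNat : ℕ) : Int) := by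
  split_ifs with h
  · push_cast
    rw [Int.toNat_of_nonneg (by omega : (0:Int) ≤ rows - 1),
      Int.toNat_of_nonneg (by omega : (0:Int) ≤ cols)]
    ring
  · have : (rows - 1).toNat = 0 ∨ cols.toNat = 0 := by omega
    rcases this with h' | h' <;> simp [h']

-- nodup for the raw A-side filterMap (no range bound in the condition)
lemma pv_nodup_rawH (bits : List Int) (R C i0 : ℕ) :
    ((List.range (R * C)).filterMap
      (fun k => if bits.getD (i0 + k) 0 ≠ 0
        then some (((k / C : ℕ) : Int), ((k % C : ℕ) : Int)) else none)).Nodup := by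
  rcases Nat.eq_zero_or_pos C with hC | hC
  · simp [hC]
  · apply List.Nodup.filterMap _ List.nodup_range
    intro a a' b hb hb'
    simp only [Option.mem_def] at hb hb'
    split_ifs at hb hb' <;> try simp_all
    rw [← hb'] at hb
    obtain ⟨e1, e2⟩ := Prod.mk.injEq _ _ _ _ ▸ hb
    have key : (a : ℤ) = (a' : ℤ) := by
      rw [← Int.ediv_add_emod (a : ℤ) (C : ℤ), ← Int.ediv_add_emod (a' : ℤ) (C : ℤ), e1, e2]
    exact_mod_cast key

lemma pv_A_eq (s : String) (rows cols : Int) :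
    decode_border_string s rows cols =
      ((List.range (rows.toNat * (cols - 1).toNat)).filterMap
         (pvFH s.toList rows.toNat (cols - 1).toNat),
       (List.range ((rows - 1).toNat * cols.toNat)).filterMap
         (fun k => pvFV s.toList rows.toNat (cols - 1).toNat (rows - 1).toNat cols.toNat
           (rows.toNat * (cols - 1).toNat + k))) := by
  simp only [decode_border_string]
  rw [pvBits_eq, List.nil_append]
  simp only [PySem.List.pyRange_one, Int.sub_zero, zero_add, List.foldl_map]
  rw [pv_foldl_range_mul rows.toNat (cols - 1).toNat,
    pv_foldl_range_mul (rows - 1).toNat cols.toNat]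
  rw [pv_A_flat (pvBits s.toList)
      (fun k => (((k / (cols - 1).toNat : ℕ) : Int), ((k % (cols - 1).toNat : ℕ) : Int)))
      (rows.toNat * (cols - 1).toNat) 0 0 (by norm_num) PySem.Set.empty
      (pv_nodup_rawH (pvBits s.toList) rows.toNat (cols - 1).toNat 0) (by simp)]
  simp only [Nat.zero_add]
  rw [pv_A_flat (pvBits s.toList)
      (fun k => (((k / cols.toNat : ℕ) : Int), ((k % cols.toNat : ℕ) : Int)))
      ((rows - 1).toNat * cols.toNat) (rows.toNat * (cols - 1).toNat)
      ((rows.toNat * (cols - 1).toNat : ℕ) : Int) rfl PySem.Set.empty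
      (pv_nodup_rawH (pvBits s.toList) (rows - 1).toNat cols.toNat
        (rows.toNat * (cols - 1).toNat)) (by simp)]
  have hemp : ∀ l : List (Int × Int), (PySem.Set.empty : PySem.Set (Int × Int)) ++ l = l :=
    fun l => rfl
  refine Prod.ext ?_ ?_
  · simp only [hemp]
    apply List.filterMap_congr
    intro x hx
    have hx' := List.mem_range.mp hx
    by_cases hb : (pvBits s.toList).getD x 0 ≠ 0
    · rw [if_pos hb, pvFH, if_pos ⟨hb, hx'⟩]
    · rw [if_neg hb, pvFH, if_neg (fun hc => hb hc.1)]
  · simp only [hemp]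
    apply List.filterMap_congr
    intro k hk
    have hk' := List.mem_range.mp hk
    by_cases hb : (pvBits s.toList).getD (rows.toNat * (cols - 1).toNat + k) 0 ≠ 0
    · rw [if_pos hb, pvFV, if_pos ⟨hb, Nat.le_add_right _ _, by omega⟩, Nat.add_sub_cancel_left]
    · rw [if_neg hb, pvFV, if_neg (fun hc : _ ∧ _ ∧ _ => hb hc.1)]

lemma pv_B_eq (s : String) (rows cols : Int) :
    decode_border_string_alt s rows cols =
      ((List.range (rows.toNat * (cols - 1).toNat)).filterMap
         (pvFH s.toList rows.toNat (cols - 1).toNat),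
       (List.range ((rows - 1).toNat * cols.toNat)).filterMap
         (fun k => pvFV s.toList rows.toNat (cols - 1).toNat (rows - 1).toNat cols.toNat
           (rows.toNat * (cols - 1).toNat + k))) := by
  simp only [decode_border_string_alt]
  rw [PySem.List.enumerate_eq_map_pyRange s.toList 'a']
  simp only [PySem.List.len_eq, PySem.List.pyRange_one, Int.sub_zero, Int.toNat_natCast,
    zero_add, List.foldl_map, PySem.List.pyGetD_natCast]
  rw [show ((5 : Int).toNat) = 5 from rfl]
  rw [pv_foldl_range_mul s.toList.length 5]
  rw [pv_hn_eq, pv_vn_eq]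
  rw [pv_foldl_pair_match (s.toList.length * 5) _
      (pvFH s.toList rows.toNat (cols - 1).toNat)
      (pvFV s.toList rows.toNat (cols - 1).toNat (rows - 1).toNat cols.toNat)
      PySem.Set.empty PySem.Set.empty
      ?_ (pvFH_nodup _ _ _ _) (pvFV_nodup _ _ _ _ _ _) (by simp) (by simp)]
  · have hemp : ∀ l : List (Int × Int), (PySem.Set.empty : PySem.Set (Int × Int)) ++ l = l :=
      fun l => rfl
    simp only [hemp]
    refine Prod.ext ?_ ?_
    · apply pv_filterMap_range_ext_both
      · intro j hj
        rw [pvFH, if_neg (fun hc => by omega)]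
      · intro j hj
        rw [pvFH, if_neg ?_]
        intro hc
        exact hc.1 (List.getD_eq_default _ _ (by rw [pvBits_length]; omega))
    · apply pv_filterMap_range_shift
      · intro j hj
        rw [pvFV, if_neg (fun hc => by omega)]
      · intro j hj
        rw [pvFV, if_neg (fun hc => by omega)]
      · intro j hj
        rw [pvFV, if_neg ?_]
        intro hc
        exact hc.1 (List.getD_eq_default _ _ (by rw [pvBits_length]; omega))
  · -- the pointwise step description
    intro st k hk
    have hk' : k < s.toList.length * 5 := List.mem_range.mp hk
    have hbit : Int.land (pvVal32 (s.toList.getD (k / 5) 'a') >>> (4 - ((k % 5 : ℕ) : Int))) 1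
        = (pvBits s.toList).getD k 0 := by
      conv_rhs => rw [show k = 5 * (k / 5) + k % 5 by omega]
      rw [pvBits_getD _ _ _ (by omega) (by omega), pvBitsOfVal_getD _ _ (by omega)]
    have hg : (((k / 5 : ℕ) : Int)) * 5 + ((k % 5 : ℕ) : Int) = (k : Int) := by omega
    rw [hg, hbit]
    by_cases hb : (pvBits s.toList).getD k 0 ≠ 0
    · rw [if_pos hb]
      by_cases h1 : k < rows.toNat * (cols - 1).toNat
      · have hC : 0 < (cols - 1).toNat := by
          rcases Nat.eq_zero_or_pos (cols - 1).toNat with h | h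
          · rw [h, Nat.mul_zero] at h1; omega
          · exact h
        rw [if_pos (by exact_mod_cast h1 : (k : Int) < ((rows.toNat * (cols - 1).toNat : ℕ) : Int))]
        have hfd : PySem.Int.floordiv (k : Int) (cols - 1) = (((k / (cols - 1).toNat : ℕ)) : Int) := by
          rw [show cols - 1 = (((cols - 1).toNat : ℕ) : Int) by omega, PySem.Int.floordiv_natCast]
          simp
        have hmd : PySem.Int.mod (k : Int) (cols - 1) = (((k % (cols - 1).toNat : ℕ)) : Int) := by
          rw [show cols - 1 = (((cols - 1).toNat : ℕ) : Int) by omega, PySem.Int.mod_natCast]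
          simp
        rw [hfd, hmd, pvFH, if_pos ⟨hb, h1⟩, pvFV, if_neg (fun hc : _ ∧ _ ∧ _ => by omega)]
      · rw [if_neg (by exact_mod_cast h1 : ¬((k : Int) < ((rows.toNat * (cols - 1).toNat : ℕ) : Int)))]
        by_cases h2 : k < rows.toNat * (cols - 1).toNat + (rows - 1).toNat * cols.toNat
        · have hC' : 0 < cols.toNat := by
            rcases Nat.eq_zero_or_pos cols.toNat with h | h
            · rw [h, Nat.mul_zero] at h2; omega
            · exact h
          rw [if_pos (by exact_mod_cast h2 :
            (k : Int) < ((rows.toNat * (cols - 1).toNat : ℕ) : Int) + (((rows - 1).toNat * cols.toNat : ℕ) : Int))]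
          have hfd : PySem.Int.floordiv ((k : Int) - ((rows.toNat * (cols - 1).toNat : ℕ) : Int)) cols
              = ((((k - rows.toNat * (cols - 1).toNat : ℕ)) / cols.toNat : ℕ) : Int) := by
            rw [show (k : Int) - ((rows.toNat * (cols - 1).toNat : ℕ) : Int)
                = (((k - rows.toNat * (cols - 1).toNat : ℕ)) : Int) by omega,
              show cols = ((cols.toNat : ℕ) : Int) by omega, PySem.Int.floordiv_natCast]
            simp
          have hmd : PySem.Int.mod ((k : Int) - ((rows.toNat * (cols - 1).toNat : ℕ) : Int)) cols
              = ((((k - rows.toNat * (cols - 1).toNat : ℕ)) % cols.toNat : ℕ) : Int) := by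
            rw [show (k : Int) - ((rows.toNat * (cols - 1).toNat : ℕ) : Int)
                = (((k - rows.toNat * (cols - 1).toNat : ℕ)) : Int) by omega,
              show cols = ((cols.toNat : ℕ) : Int) by omega, PySem.Int.mod_natCast]
            simp
          rw [hfd, hmd, pvFH, if_neg (fun hc : _ ∧ _ => h1 hc.2), pvFV, if_pos ⟨hb, by omega, h2⟩]
        · rw [if_neg (by exact_mod_cast h2 :
            ¬((k : Int) < ((rows.toNat * (cols - 1).toNat : ℕ) : Int) + (((rows - 1).toNat * cols.toNat : ℕ) : Int)))]
          rw [pvFH, if_neg (fun hc : _ ∧ _ => h1 hc.2), pvFV,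
            if_neg (fun hc : _ ∧ _ ∧ _ => by omega)]
    · rw [if_neg hb, pvFH, if_neg (fun hc : _ ∧ _ => hb hc.1), pvFV,
        if_neg (fun hc : _ ∧ _ ∧ _ => hb hc.1)]



-- ===== VERDICT (by name: the statement is the Claim_ definition above) =====
theorem decode_border_string_spec : Claim_equal_decode_border_string := by
  intro border_str rows cols _ _
  unfold Spec_decode_border_string
  rw [pv_A_eq, pv_B_eq]
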